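-- pv_equiv track=rewrite | github.com/narpfel/adventofcode | 2024/21/solution.py | apply_moves_directional
-- ===== SOURCE A (Python) =====
-- DIRECTIONAL_KEYPAD = {
--     (1, 0): "^",
--     (2, 0): "A",
--     (0, 1): "<",
--     (1, 1): "v",
--     (2, 1): ">",
-- }
--
-- DIRECTIONAL_KEY_POSITION = {key: loc for loc, key in DIRECTIONAL_KEYPAD.items()}
--
-- def apply_moves_directional(moves):
--     x, y = DIRECTIONAL_KEY_POSITION["A"]
--     output = []
--     for move in moves:
--         match move:
--             case "A":
--                 output.append(DIRECTIONAL_KEYPAD[x, y])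
--             case "<":
--                 x -= 1
--             case ">":
--                 x += 1
--             case "^":
--                 y -= 1
--             case "v":
--                 y += 1
--         assert (x, y) in DIRECTIONAL_KEYPAD
--     return "".join(output)
-- ===== SOURCE B (Python) =====
-- DIRECTIONAL_KEYPAD = {
--     (1, 0): "^",
--     (2, 0): "A",
--     (0, 1): "<",
--     (1, 1): "v",
--     (2, 1): ">",
-- }
--
-- _OFFSETS = {"<": (-1, 0), ">": (1, 0), "^": (0, -1), "v": (0, 1)}
--
-- # (key, direction) -> neighbouring key, precomputed once from the keypad layout
-- TRANSITIONS = {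
--     (key, d): DIRECTIONAL_KEYPAD[(x + dx, y + dy)]
--     for (x, y), key in DIRECTIONAL_KEYPAD.items()
--     for d, (dx, dy) in _OFFSETS.items()
--     if (x + dx, y + dy) in DIRECTIONAL_KEYPAD
-- }
--
--
-- def apply_moves_directional(moves):
--     key = "A"
--     output = []
--     for move in moves:
--         if move == "A":
--             output.append(key)
--         elif move in "<>^v":
--             key = TRANSITIONS.get((key, move))
--             assert key is not None
--     return "".join(output)
-- ===== Notes on version B (the rewrite author's own statement) =====
-- stated objective: idiomatic
-- what changed: B maintains the current key as a symbol driven by a precomputed (key, direction) -> key transition table, instead of simulating (x, y) coordinates, rebuilding a tuple and re-checking keypad membership on every move and looking the symbol up in the keypad dict on every press.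
import Mathlib
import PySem

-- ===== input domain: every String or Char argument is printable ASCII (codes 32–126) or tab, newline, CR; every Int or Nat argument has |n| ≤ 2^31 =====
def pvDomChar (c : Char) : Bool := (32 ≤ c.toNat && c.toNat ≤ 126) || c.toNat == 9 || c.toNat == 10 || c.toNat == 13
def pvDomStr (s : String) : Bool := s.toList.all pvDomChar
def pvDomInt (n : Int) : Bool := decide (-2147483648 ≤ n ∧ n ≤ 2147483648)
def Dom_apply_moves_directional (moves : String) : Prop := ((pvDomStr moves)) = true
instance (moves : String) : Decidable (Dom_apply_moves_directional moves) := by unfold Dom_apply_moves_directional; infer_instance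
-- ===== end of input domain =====

-- B replaces A's (x, y) coordinate simulation by a symbol-state machine over a
-- precomputed (key, direction) -> key transition table (objective: idiomatic).


-- ===== PORT A =====
-- DIRECTIONAL_KEYPAD as an association list (dict in insertion order)
def pvKeypadA : PySem.Dict (Int × Int) String :=
  PySem.Dict.ofList [((1, 0), "^"), ((2, 0), "A"), ((0, 1), "<"), ((1, 1), "v"), ((2, 1), ">")]

-- body of A's for-loop; the DIRECTIONAL_KEYPAD lookup uses default "" — under
-- Pre_ the key is always present, so the default is never used
def pvStepA (s : Int × Int × List String) (move : Char) : Int × Int × List String :=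
  let (x, y, output) := s
  if move = 'A' then (x, y, output ++ [PySem.Dict.getD pvKeypadA (x, y) ""])
  else if move = '<' then (x - 1, y, output)
  else if move = '>' then (x + 1, y, output)
  else if move = '^' then (x, y - 1, output)
  else if move = 'v' then (x, y + 1, output)
  else (x, y, output)

def apply_moves_directional (moves : String) : String :=
  PySem.Str.join "" (moves.toList.foldl pvStepA (2, 0, ([] : List String))).2.2

-- ===== PORT B =====
-- TRANSITIONS: (key, direction) -> neighbouring key, precomputed from the layout
def pvTransitions : PySem.Dict (Char × Char) Char :=
  PySem.Dict.ofList [(('^', 'v'), 'v'), (('^', '>'), 'A'),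
   (('A', '<'), '^'), (('A', 'v'), '>'),
   (('<', '>'), 'v'),
   (('v', '<'), '<'), (('v', '^'), '^'), (('v', '>'), '>'),
   (('>', '<'), 'v'), (('>', '^'), 'A')]

-- body of B's for-loop; the assert fires exactly when the lookup misses, which
-- Pre_ excludes, so the default (keeping the key) is never used
def pvStepB (s : Char × List Char) (move : Char) : Char × List Char :=
  if move = 'A' then (s.1, s.2 ++ [s.1])
  else if move = '<' ∨ move = '>' ∨ move = '^' ∨ move = 'v' then
    (PySem.Dict.getD pvTransitions (s.1, move) s.1, s.2)
  else s

def apply_moves_directional_alt (moves : String) : String :=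
  String.ofList (moves.toList.foldl pvStepB ('A', ([] : List Char))).2

-- ===== PRECONDITION & SPEC =====
def pvKeys : List (Int × Int) := [(1, 0), (2, 0), (0, 1), (1, 1), (2, 1)]

def pvPreStep (s : Option (Int × Int)) (c : Char) : Option (Int × Int) :=
  match s with
  | none => none
  | some (x, y) =>
    let p : Int × Int :=
      if c = '<' then (x - 1, y)
      else if c = '>' then (x + 1, y)
      else if c = '^' then (x, y - 1)
      else if c = 'v' then (x, y + 1)
      else (x, y)
    if p ∈ pvKeys then some p else none

-- Pre_ excludes exactly the inputs whose move sequence walks the cursor off the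
-- keypad, where A (and B) raise AssertionError.
def Pre_apply_moves_directional (moves : String) : Prop :=
  (moves.toList.foldl pvPreStep (some (2, 0))).isSome = true
instance (moves : String) : Decidable (Pre_apply_moves_directional moves) := by
  unfold Pre_apply_moves_directional; infer_instance

def pvWitness_apply_moves_directional : String := "<A>AvA"

def Spec_apply_moves_directional (moves : String) (out : String) : Prop := out = apply_moves_directional_alt moves
instance (moves : String) (out : String) : Decidable (Spec_apply_moves_directional moves out) := by unfold Spec_apply_moves_directional; infer_instance

-- ===== CLAIM (what is proved, stated in full; the proofs are below) =====
def Claim_equal_apply_moves_directional : Prop := ∀ (moves : String), Dom_apply_moves_directional moves → Pre_apply_moves_directional moves → Spec_apply_moves_directional moves (apply_moves_directional moves)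

-- ===== LEMMAS AND PROOFS =====

-- fold of pvPreStep from none is none
theorem pvPreStep_none (l : List Char) : l.foldl pvPreStep none = none := by
  induction l with
  | nil => rfl
  | cons c l ih => simpa [pvPreStep] using ih

-- the key/position correspondence maintained by the two loops
def pvInv (k : Char) (x y : Int) : Prop :=
  (k, x, y) ∈ [('^', (1 : Int), (0 : Int)), ('A', 2, 0), ('<', 0, 1), ('v', 1, 1), ('>', 2, 1)]

theorem pvJoin_map (l : List Char) :
    PySem.Str.join "" (l.map (fun c => String.ofList [c])) = String.ofList l := by
  simp [PySem.Str.join, Function.comp_def, PySem.Chars.join_nil_singletons]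

theorem pvStepA_A (x y : Int) (outA : List String) :
    pvStepA (x, y, outA) 'A' = (x, y, outA ++ [PySem.Dict.getD pvKeypadA (x, y) ""]) := by
  simp [pvStepA]

theorem pvStepB_A (k : Char) (outB : List Char) :
    pvStepB (k, outB) 'A' = (k, outB ++ [k]) := by
  simp [pvStepB]

theorem pvStepA_lt (x y : Int) (outA : List String) : pvStepA (x, y, outA) '<' = (x - 1, y, outA) := by
  simp [pvStepA]
theorem pvStepA_gt (x y : Int) (outA : List String) : pvStepA (x, y, outA) '>' = (x + 1, y, outA) := by
  simp [pvStepA]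
theorem pvStepA_up (x y : Int) (outA : List String) : pvStepA (x, y, outA) '^' = (x, y - 1, outA) := by
  simp [pvStepA]
theorem pvStepA_dn (x y : Int) (outA : List String) : pvStepA (x, y, outA) 'v' = (x, y + 1, outA) := by
  simp [pvStepA]

theorem pvStepB_lt (k : Char) (outB : List Char) :
    pvStepB (k, outB) '<' = (PySem.Dict.getD pvTransitions (k, '<') k, outB) := by simp [pvStepB]
theorem pvStepB_gt (k : Char) (outB : List Char) :
    pvStepB (k, outB) '>' = (PySem.Dict.getD pvTransitions (k, '>') k, outB) := by simp [pvStepB]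
theorem pvStepB_up (k : Char) (outB : List Char) :
    pvStepB (k, outB) '^' = (PySem.Dict.getD pvTransitions (k, '^') k, outB) := by simp [pvStepB]
theorem pvStepB_dn (k : Char) (outB : List Char) :
    pvStepB (k, outB) 'v' = (PySem.Dict.getD pvTransitions (k, 'v') k, outB) := by simp [pvStepB]

theorem pvStepA_other (x y : Int) (outA : List String) (c : Char) (h1 : c ≠ 'A') (h2 : c ≠ '<')
    (h3 : c ≠ '>') (h4 : c ≠ '^') (h5 : c ≠ 'v') : pvStepA (x, y, outA) c = (x, y, outA) := by
  simp [pvStepA, h1, h2, h3, h4, h5]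
theorem pvStepB_other (k : Char) (outB : List Char) (c : Char) (h1 : c ≠ 'A') (h2 : c ≠ '<')
    (h3 : c ≠ '>') (h4 : c ≠ '^') (h5 : c ≠ 'v') : pvStepB (k, outB) c = (k, outB) := by
  simp [pvStepB, h1, h2, h3, h4, h5]

theorem pvPreStep_other (x y : Int) (c : Char) (h2 : c ≠ '<') (h3 : c ≠ '>')
    (h4 : c ≠ '^') (h5 : c ≠ 'v') (hmem : ((x, y) : Int × Int) ∈ pvKeys) :
    pvPreStep (some (x, y)) c = some (x, y) := by
  simp [pvPreStep, h2, h3, h4, h5, hmem]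

theorem pvMain (l : List Char) (k : Char) (x y : Int) (outA : List String) (outB : List Char)
    (hinv : pvInv k x y) (hout : outA = outB.map (fun c => String.ofList [c]))
    (hpre : (l.foldl pvPreStep (some (x, y))).isSome = true) :
    (l.foldl pvStepA (x, y, outA)).2.2 = ((l.foldl pvStepB (k, outB)).2).map (fun c => String.ofList [c]) := by
  induction l generalizing k x y outA outB with
  | nil => simpa using hout
  | cons c l ih =>
    simp only [pvInv, List.mem_cons, List.not_mem_nil, or_false, Prod.mk.injEq] at hinv
    simp only [List.foldl_cons] at hpre ⊢
    rcases hinv with ⟨rfl, rfl, rfl⟩ | ⟨rfl, rfl, rfl⟩ | ⟨rfl, rfl, rfl⟩ | ⟨rfl, rfl, rfl⟩ | ⟨rfl, rfl, rfl⟩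
    · by_cases hc1 : c = 'A'
      · subst hc1
        rw [pvStepA_A, pvStepB_A]
        rw [show pvPreStep (some ((1 : Int), (0 : Int))) 'A' = some (1, 0) from by decide] at hpre
        refine ih _ _ _ _ _ (by unfold pvInv; decide) ?_ hpre
        rw [show (PySem.Dict.getD pvKeypadA ((1 : Int), (0 : Int)) "") = String.ofList ['^'] from by decide]
        simp [hout]
      by_cases hc2 : c = '<'
      · subst hc2
        rw [show pvPreStep (some ((1 : Int), (0 : Int))) '<' = none from by decide, pvPreStep_none] at hpre
        simp at hpre
      by_cases hc3 : c = '>'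
      · subst hc3
        rw [pvStepA_gt, pvStepB_gt]
        rw [show pvPreStep (some ((1 : Int), (0 : Int))) '>' = some (2, 0) from by decide] at hpre
        have h2 := ih (PySem.Dict.getD pvTransitions ('^', '>') '^') 2 0 outA outB
          (by unfold pvInv; decide) hout hpre
        simpa using h2
      by_cases hc4 : c = '^'
      · subst hc4
        rw [show pvPreStep (some ((1 : Int), (0 : Int))) '^' = none from by decide, pvPreStep_none] at hpre
        simp at hpre
      by_cases hc5 : c = 'v'
      · subst hc5
        rw [pvStepA_dn, pvStepB_dn]
        rw [show pvPreStep (some ((1 : Int), (0 : Int))) 'v' = some (1, 1) from by decide] at hpre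
        have h2 := ih (PySem.Dict.getD pvTransitions ('^', 'v') '^') 1 1 outA outB
          (by unfold pvInv; decide) hout hpre
        simpa using h2
      · rw [pvStepA_other _ _ _ _ hc1 hc2 hc3 hc4 hc5, pvStepB_other _ _ _ hc1 hc2 hc3 hc4 hc5]
        rw [pvPreStep_other _ _ _ hc2 hc3 hc4 hc5 (by decide)] at hpre
        exact ih _ _ _ _ _ (by unfold pvInv; decide) hout hpre
    · by_cases hc1 : c = 'A'
      · subst hc1
        rw [pvStepA_A, pvStepB_A]
        rw [show pvPreStep (some ((2 : Int), (0 : Int))) 'A' = some (2, 0) from by decide] at hpre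
        refine ih _ _ _ _ _ (by unfold pvInv; decide) ?_ hpre
        rw [show (PySem.Dict.getD pvKeypadA ((2 : Int), (0 : Int)) "") = String.ofList ['A'] from by decide]
        simp [hout]
      by_cases hc2 : c = '<'
      · subst hc2
        rw [pvStepA_lt, pvStepB_lt]
        rw [show pvPreStep (some ((2 : Int), (0 : Int))) '<' = some (1, 0) from by decide] at hpre
        have h2 := ih (PySem.Dict.getD pvTransitions ('A', '<') 'A') 1 0 outA outB
          (by unfold pvInv; decide) hout hpre
        simpa using h2
      by_cases hc3 : c = '>'
      · subst hc3
        rw [show pvPreStep (some ((2 : Int), (0 : Int))) '>' = none from by decide, pvPreStep_none] at hpre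
        simp at hpre
      by_cases hc4 : c = '^'
      · subst hc4
        rw [show pvPreStep (some ((2 : Int), (0 : Int))) '^' = none from by decide, pvPreStep_none] at hpre
        simp at hpre
      by_cases hc5 : c = 'v'
      · subst hc5
        rw [pvStepA_dn, pvStepB_dn]
        rw [show pvPreStep (some ((2 : Int), (0 : Int))) 'v' = some (2, 1) from by decide] at hpre
        have h2 := ih (PySem.Dict.getD pvTransitions ('A', 'v') 'A') 2 1 outA outB
          (by unfold pvInv; decide) hout hpre
        simpa using h2
      · rw [pvStepA_other _ _ _ _ hc1 hc2 hc3 hc4 hc5, pvStepB_other _ _ _ hc1 hc2 hc3 hc4 hc5]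
        rw [pvPreStep_other _ _ _ hc2 hc3 hc4 hc5 (by decide)] at hpre
        exact ih _ _ _ _ _ (by unfold pvInv; decide) hout hpre
    · by_cases hc1 : c = 'A'
      · subst hc1
        rw [pvStepA_A, pvStepB_A]
        rw [show pvPreStep (some ((0 : Int), (1 : Int))) 'A' = some (0, 1) from by decide] at hpre
        refine ih _ _ _ _ _ (by unfold pvInv; decide) ?_ hpre
        rw [show (PySem.Dict.getD pvKeypadA ((0 : Int), (1 : Int)) "") = String.ofList ['<'] from by decide]
        simp [hout]
      by_cases hc2 : c = '<'
      · subst hc2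
        rw [show pvPreStep (some ((0 : Int), (1 : Int))) '<' = none from by decide, pvPreStep_none] at hpre
        simp at hpre
      by_cases hc3 : c = '>'
      · subst hc3
        rw [pvStepA_gt, pvStepB_gt]
        rw [show pvPreStep (some ((0 : Int), (1 : Int))) '>' = some (1, 1) from by decide] at hpre
        have h2 := ih (PySem.Dict.getD pvTransitions ('<', '>') '<') 1 1 outA outB
          (by unfold pvInv; decide) hout hpre
        simpa using h2
      by_cases hc4 : c = '^'
      · subst hc4
        rw [show pvPreStep (some ((0 : Int), (1 : Int))) '^' = none from by decide, pvPreStep_none] at hpre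
        simp at hpre
      by_cases hc5 : c = 'v'
      · subst hc5
        rw [show pvPreStep (some ((0 : Int), (1 : Int))) 'v' = none from by decide, pvPreStep_none] at hpre
        simp at hpre
      · rw [pvStepA_other _ _ _ _ hc1 hc2 hc3 hc4 hc5, pvStepB_other _ _ _ hc1 hc2 hc3 hc4 hc5]
        rw [pvPreStep_other _ _ _ hc2 hc3 hc4 hc5 (by decide)] at hpre
        exact ih _ _ _ _ _ (by unfold pvInv; decide) hout hpre
    · by_cases hc1 : c = 'A'
      · subst hc1
        rw [pvStepA_A, pvStepB_A]
        rw [show pvPreStep (some ((1 : Int), (1 : Int))) 'A' = some (1, 1) from by decide] at hpre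
        refine ih _ _ _ _ _ (by unfold pvInv; decide) ?_ hpre
        rw [show (PySem.Dict.getD pvKeypadA ((1 : Int), (1 : Int)) "") = String.ofList ['v'] from by decide]
        simp [hout]
      by_cases hc2 : c = '<'
      · subst hc2
        rw [pvStepA_lt, pvStepB_lt]
        rw [show pvPreStep (some ((1 : Int), (1 : Int))) '<' = some (0, 1) from by decide] at hpre
        have h2 := ih (PySem.Dict.getD pvTransitions ('v', '<') 'v') 0 1 outA outB
          (by unfold pvInv; decide) hout hpre
        simpa using h2
      by_cases hc3 : c = '>'
      · subst hc3
        rw [pvStepA_gt, pvStepB_gt]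
        rw [show pvPreStep (some ((1 : Int), (1 : Int))) '>' = some (2, 1) from by decide] at hpre
        have h2 := ih (PySem.Dict.getD pvTransitions ('v', '>') 'v') 2 1 outA outB
          (by unfold pvInv; decide) hout hpre
        simpa using h2
      by_cases hc4 : c = '^'
      · subst hc4
        rw [pvStepA_up, pvStepB_up]
        rw [show pvPreStep (some ((1 : Int), (1 : Int))) '^' = some (1, 0) from by decide] at hpre
        have h2 := ih (PySem.Dict.getD pvTransitions ('v', '^') 'v') 1 0 outA outB
          (by unfold pvInv; decide) hout hpre
        simpa using h2
      by_cases hc5 : c = 'v'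
      · subst hc5
        rw [show pvPreStep (some ((1 : Int), (1 : Int))) 'v' = none from by decide, pvPreStep_none] at hpre
        simp at hpre
      · rw [pvStepA_other _ _ _ _ hc1 hc2 hc3 hc4 hc5, pvStepB_other _ _ _ hc1 hc2 hc3 hc4 hc5]
        rw [pvPreStep_other _ _ _ hc2 hc3 hc4 hc5 (by decide)] at hpre
        exact ih _ _ _ _ _ (by unfold pvInv; decide) hout hpre
    · by_cases hc1 : c = 'A'
      · subst hc1
        rw [pvStepA_A, pvStepB_A]
        rw [show pvPreStep (some ((2 : Int), (1 : Int))) 'A' = some (2, 1) from by decide] at hpre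
        refine ih _ _ _ _ _ (by unfold pvInv; decide) ?_ hpre
        rw [show (PySem.Dict.getD pvKeypadA ((2 : Int), (1 : Int)) "") = String.ofList ['>'] from by decide]
        simp [hout]
      by_cases hc2 : c = '<'
      · subst hc2
        rw [pvStepA_lt, pvStepB_lt]
        rw [show pvPreStep (some ((2 : Int), (1 : Int))) '<' = some (1, 1) from by decide] at hpre
        have h2 := ih (PySem.Dict.getD pvTransitions ('>', '<') '>') 1 1 outA outB
          (by unfold pvInv; decide) hout hpre
        simpa using h2
      by_cases hc3 : c = '>'
      · subst hc3
        rw [show pvPreStep (some ((2 : Int), (1 : Int))) '>' = none from by decide, pvPreStep_none] at hpre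
        simp at hpre
      by_cases hc4 : c = '^'
      · subst hc4
        rw [pvStepA_up, pvStepB_up]
        rw [show pvPreStep (some ((2 : Int), (1 : Int))) '^' = some (2, 0) from by decide] at hpre
        have h2 := ih (PySem.Dict.getD pvTransitions ('>', '^') '>') 2 0 outA outB
          (by unfold pvInv; decide) hout hpre
        simpa using h2
      by_cases hc5 : c = 'v'
      · subst hc5
        rw [show pvPreStep (some ((2 : Int), (1 : Int))) 'v' = none from by decide, pvPreStep_none] at hpre
        simp at hpre
      · rw [pvStepA_other _ _ _ _ hc1 hc2 hc3 hc4 hc5, pvStepB_other _ _ _ hc1 hc2 hc3 hc4 hc5]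
        rw [pvPreStep_other _ _ _ hc2 hc3 hc4 hc5 (by decide)] at hpre
        exact ih _ _ _ _ _ (by unfold pvInv; decide) hout hpre

theorem apply_moves_directional_spec : Claim_equal_apply_moves_directional := by
  intro moves _ hpre
  unfold Spec_apply_moves_directional apply_moves_directional apply_moves_directional_alt
  rw [pvMain moves.toList 'A' 2 0 [] [] (by unfold pvInv; decide) rfl hpre, pvJoin_map]
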